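-- pv_equiv track=rewrite | github.com/emino39/Algorithm | sw_expert_academy/5203.py | check_run
-- ===== SOURCE A (Python) =====
-- def check_run(card_dict):
--     runs = [
--         [0, 1, 2], [1, 2, 3], [2, 3, 4], [3, 4, 5],
--         [4, 5, 6], [5, 6, 7], [6, 7, 8], [7, 8, 9]
--     ]
--     card_nums = [k for k, v in card_dict.items() if v >= 1]
--     if len(card_nums) < 3:
--         return False
--     else:
--         for c in range(len(card_nums) - 2):
--             if card_nums[c:c+3] in runs:
--                 return True
--         return False
-- ===== SOURCE B (Python) =====
-- def check_run(card_dict):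
--     run = 0
--     prev = None
--     for k, v in card_dict.items():
--         if v >= 1:
--             run = run + 1 if prev is not None and k == prev + 1 else 1
--             if run >= 3 and 2 <= k <= 9:
--                 return True
--             prev = k
--     return False
-- ===== Notes on version B (the rewrite author's own statement) =====
-- stated objective: simpler
-- what changed: Replaces A's precomputed 8-row runs table, len<3 guard and index loop doing a per-window 3-slice plus list-membership test by a single-pass state machine that tracks the current consecutive-run length (run, prev) over the dict items and returns True as soon as a run of 3 within 0..9 completes; no auxiliary list of card numbers or table is built.
import Mathlib
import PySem

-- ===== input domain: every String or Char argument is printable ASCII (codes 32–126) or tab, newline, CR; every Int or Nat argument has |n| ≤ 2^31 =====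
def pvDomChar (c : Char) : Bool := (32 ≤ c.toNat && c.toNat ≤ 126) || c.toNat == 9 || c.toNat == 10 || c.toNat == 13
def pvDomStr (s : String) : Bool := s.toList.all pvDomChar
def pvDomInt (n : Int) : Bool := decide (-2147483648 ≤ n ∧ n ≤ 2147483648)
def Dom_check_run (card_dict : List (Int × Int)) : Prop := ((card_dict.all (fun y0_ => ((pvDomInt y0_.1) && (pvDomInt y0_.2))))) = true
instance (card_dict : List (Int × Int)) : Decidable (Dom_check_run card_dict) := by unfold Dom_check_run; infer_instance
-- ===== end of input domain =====

-- B replaces A's runs table, len<3 guard and window-slice loop by a single-pass state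
-- machine tracking the current consecutive-run length (objective: simpler).

-- ===== PORT A =====
def check_run (card_dict : List (Int × Int)) : Bool :=
  let runs : List (List Int) :=
    [[0, 1, 2], [1, 2, 3], [2, 3, 4], [3, 4, 5],
     [4, 5, 6], [5, 6, 7], [6, 7, 8], [7, 8, 9]]
  let card_nums : List Int :=
    ((PySem.Dict.ofList card_dict).items.filter (fun p => decide ((1 : Int) ≤ p.2))).map (·.1)
  if card_nums.length < 3 then false
  else
    (PySem.List.pyRange 0 ((card_nums.length : Int) - 2) 1).any
      (fun c => runs.contains (PySem.List.slice card_nums (some c) (some (c + 3))))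

-- ===== PORT B =====
-- the for-loop of Source B with early return, as a structural recursion over the items
def check_run_alt_go (run : Int) (prev : Option Int) : List (Int × Int) → Bool
  | [] => false
  | (k, v) :: rest =>
    if (1 : Int) ≤ v then
      let run' : Int :=
        if (match prev with | some p => decide (k = p + 1) | none => false) then run + 1 else 1
      if 3 ≤ run' ∧ 2 ≤ k ∧ k ≤ 9 then true
      else check_run_alt_go run' (some k) rest
    else check_run_alt_go run prev rest

def check_run_alt (card_dict : List (Int × Int)) : Bool :=
  check_run_alt_go 0 none (PySem.Dict.ofList card_dict).items

-- ===== PRECONDITION & SPEC =====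
def Spec_check_run (card_dict : List (Int × Int)) (out : Bool) : Prop := out = check_run_alt card_dict
instance (card_dict : List (Int × Int)) (out : Bool) : Decidable (Spec_check_run card_dict out) := by unfold Spec_check_run; infer_instance

-- ===== CLAIM (what is proved, stated in full; the proofs are below) =====
def Claim_equal_check_run : Prop := ∀ (card_dict : List (Int × Int)), Dom_check_run card_dict → Spec_check_run card_dict (check_run card_dict)

-- ===== LEMMAS AND PROOFS =====

def pvRuns : List (List Int) :=
  [[0, 1, 2], [1, 2, 3], [2, 3, 4], [3, 4, 5],
   [4, 5, 6], [5, 6, 7], [6, 7, 8], [7, 8, 9]]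

-- membership of a 3-element list in the runs table is exactly the closed-form run predicate
theorem pv_mem_triple (x y z : Int) :
    (decide ([x, y, z] ∈ pvRuns) : Bool)
      = (decide (x + 1 = y) && decide (y + 1 = z) && decide (0 ≤ x) && decide (z ≤ 9)) := by
  rw [Bool.eq_iff_iff]
  simp only [pvRuns, List.mem_cons, List.not_mem_nil, List.cons.injEq, and_true, or_false,
    Bool.and_eq_true, decide_eq_true_eq]
  constructor
  · rintro (h | h | h | h | h | h | h | h) <;> omega
  · rintro ⟨⟨⟨h1, h2⟩, h3⟩, h4⟩
    have hx : x ≤ 7 := by omega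
    interval_cases x <;> omega

-- "some window of three consecutive in-bounds values", by direct recursion
def pvT : List Int → Bool
  | a :: b :: c :: rest =>
    (decide (a + 1 = b) && decide (b + 1 = c) && decide (0 ≤ a) && decide (c ≤ 9))
      || pvT (b :: c :: rest)
  | _ => false

-- A's window loop, after reducing pyRange/slice to List.range and drop/take
def pvA (l : List Int) : Bool :=
  (List.range (((l.length : Int) - 2).toNat)).any
    (fun k => pvRuns.contains ((l.drop k).take 3))

-- B's loop restricted to the list of surviving keys
def pvL (run : Int) (prev : Option Int) : List Int → Bool
  | [] => false
  | k :: rest =>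
    let run' : Int :=
      if (match prev with | some p => decide (k = p + 1) | none => false) then run + 1 else 1
    if 3 ≤ run' ∧ 2 ≤ k ∧ k ≤ 9 then true
    else pvL run' (some k) rest

-- a run triple finishing in the first one or two elements of l, continuing state (p, r)
def pvS (p r : Int) : List Int → Bool
  | [] => false
  | k :: rest =>
    (decide (k = p + 1) && decide (2 ≤ r) && decide (2 ≤ k) && decide (k ≤ 9))
      || (match rest with
          | k2 :: _ =>
            decide (k = p + 1) && decide (k2 = k + 1) && decide (1 ≤ r)
              && decide (2 ≤ k2) && decide (k2 ≤ 9)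
          | [] => false)

theorem pvA_eq_pvT : ∀ l : List Int, pvA l = pvT l
  | [] => rfl
  | [_] => rfl
  | [_, _] => rfl
  | a :: b :: c :: rest => by
    have ih := pvA_eq_pvT (b :: c :: rest)
    have hn : (((a :: b :: c :: rest).length : Int) - 2).toNat = rest.length + 1 := by
      simp; omega
    have hn' : (((b :: c :: rest).length : Int) - 2).toNat = rest.length := by
      simp; omega
    have ht : List.take 3 (a :: b :: c :: rest) = [a, b, c] := rfl
    simp only [pvA, hn, hn', List.range_succ_eq_map, List.any_cons, List.any_map,
      Function.comp_def, List.drop_succ_cons, List.drop_zero, ht] at ih ⊢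
    rw [pvT]
    rw [← ih, List.contains_eq_mem, pv_mem_triple]

-- one-step unfolding lemmas (definitional), to control rewriting
theorem pv_go_cons (run : Int) (prev : Option Int) (k v : Int) (rest : List (Int × Int)) :
    check_run_alt_go run prev ((k, v) :: rest)
      = (if (1 : Int) ≤ v then
          (if 3 ≤ (if (match prev with | some p => decide (k = p + 1) | none => false)
                   then run + 1 else 1) ∧ 2 ≤ k ∧ k ≤ 9 then true
           else check_run_alt_go
             (if (match prev with | some p => decide (k = p + 1) | none => false)
              then run + 1 else 1) (some k) rest)
         else check_run_alt_go run prev rest) := rfl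

theorem pvL_cons (run : Int) (prev : Option Int) (k : Int) (rest : List Int) :
    pvL run prev (k :: rest)
      = (if 3 ≤ (if (match prev with | some p => decide (k = p + 1) | none => false)
                 then run + 1 else 1) ∧ 2 ≤ k ∧ k ≤ 9 then true
         else pvL
           (if (match prev with | some p => decide (k = p + 1) | none => false)
            then run + 1 else 1) (some k) rest) := rfl

theorem pvT_cons (a b c : Int) (rest : List Int) :
    pvT (a :: b :: c :: rest)
      = ((decide (a + 1 = b) && decide (b + 1 = c) && decide (0 ≤ a) && decide (c ≤ 9))
          || pvT (b :: c :: rest)) := rfl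

theorem pv_go_filter : ∀ (l : List (Int × Int)) (run : Int) (prev : Option Int),
    check_run_alt_go run prev l
      = pvL run prev ((l.filter (fun p => decide ((1 : Int) ≤ p.2))).map (·.1))
  | [], _, _ => rfl
  | (k, v) :: rest, run, prev => by
    by_cases hv : (1 : Int) ≤ v
    · have hfm : (((k, v) :: rest).filter (fun p => decide ((1 : Int) ≤ p.2))).map (·.1)
          = k :: ((rest.filter (fun p => decide ((1 : Int) ≤ p.2))).map (·.1)) := by
        simp [List.filter_cons, hv]
      rw [pv_go_cons, if_pos hv, hfm, pvL_cons]
      split_ifs <;> first | rfl | exact pv_go_filter rest _ _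
    · have hfm : (((k, v) :: rest).filter (fun p => decide ((1 : Int) ≤ p.2)))
          = rest.filter (fun p => decide ((1 : Int) ≤ p.2)) := by
        simp [List.filter_cons, hv]
      rw [pv_go_cons, if_neg hv, hfm]
      exact pv_go_filter rest run prev

-- invariant of B's loop from a previous element p with run count r ≥ 1:
-- it finds a triple finishing at the boundary (pvS) or fully inside the list (pvT)
theorem pvL_some : ∀ (l : List Int) (p r : Int), 1 ≤ r →
    pvL r (some p) l = (pvS p r l || pvT l) := by
  intro l
  induction l with
  | nil => intro p r _; rfl
  | cons k rest ih =>
    intro p r hr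
    have hrun : (1:Int) ≤ (if (match (some p : Option Int) with
        | some q => decide (k = q + 1) | none => false) then r + 1 else 1) := by
      split_ifs <;> (try ring_nf) <;> omega
    rw [pvL_cons, ih _ _ hrun]
    rcases rest with _ | ⟨k2, _ | ⟨k3, r3⟩⟩
    · split_ifs <;> rw [Bool.eq_iff_iff] <;>
        simp only [pvS, pvT, Bool.or_eq_true, Bool.and_eq_true, decide_eq_true_eq,
          Bool.false_eq_true, or_false, false_or, true_iff, iff_true, false_iff, iff_false,
          not_and, not_or, not_le, not_lt] at * <;> (try ring_nf at *) <;> omega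
    · split_ifs <;> rw [Bool.eq_iff_iff] <;>
        simp only [pvS, pvT, Bool.or_eq_true, Bool.and_eq_true, decide_eq_true_eq,
          Bool.false_eq_true, or_false, false_or, true_iff, iff_true, false_iff, iff_false,
          not_and, not_or, not_le, not_lt] at * <;> (try ring_nf at *) <;> omega
    · rw [pvT_cons]
      cases htv : pvT (k2 :: k3 :: r3) <;>
        split_ifs <;> rw [Bool.eq_iff_iff] <;>
          simp only [pvS, htv, Bool.or_eq_true, Bool.and_eq_true, decide_eq_true_eq,
            Bool.false_eq_true, Bool.true_eq, or_false, false_or, or_true, true_or,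
            true_iff, iff_true, false_iff, iff_false,
            not_and, not_or, not_le, not_lt] at * <;> (try ring_nf at *) <;> omega

theorem pvL_start : ∀ l : List Int, pvL 0 none l = pvT l
  | [] => rfl
  | k :: rest => by
    rw [pvL_cons]
    rw [if_neg (by simp : ¬ ((3:Int) ≤ (if (false : Bool) then (0:Int) + 1 else 1) ∧ 2 ≤ k ∧ k ≤ 9)),
        if_neg (by simp : ¬ (false = true)), pvL_some _ _ _ (by omega)]
    rcases rest with _ | ⟨k2, _ | ⟨k3, r3⟩⟩
    · rfl
    · rw [Bool.eq_iff_iff]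
      simp [pvS, pvT]
    · rw [pvT_cons, Bool.eq_iff_iff]
      cases htv : pvT (k2 :: k3 :: r3) <;>
        simp only [pvS, htv, Bool.or_eq_true, Bool.and_eq_true, decide_eq_true_eq,
          Bool.false_eq_true, Bool.true_eq, or_false, false_or, or_true, true_or,
          true_iff, iff_true, false_iff, iff_false, not_and, not_or, not_le, not_lt] <;>
        (try ring_nf) <;> omega

theorem check_run_eq_pvA (d : List (Int × Int)) :
    check_run d
      = pvA (((PySem.Dict.ofList d).items.filter (fun p => decide ((1 : Int) ≤ p.2))).map (·.1)) := by
  unfold check_run pvA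
  dsimp only
  set l := ((PySem.Dict.ofList d).items.filter (fun p => decide ((1 : Int) ≤ p.2))).map (·.1) with hl
  by_cases h : l.length < 3
  · have h0 : (((l.length : Int)) - 2).toNat = 0 := by omega
    simp [h, h0]
  · rw [if_neg h]
    rw [PySem.List.pyRange_one]
    have hs : ∀ k : Nat, PySem.List.slice l (some ((0 : Int) + k)) (some ((0 : Int) + k + 3))
        = (l.drop k).take 3 := by
      intro k
      have h3 : ((0 : Int) + k + 3) = ((k + 3 : Nat) : Int) := by push_cast; ring
      have h0 : ((0 : Int) + k) = ((k : Nat) : Int) := zero_add _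
      rw [h3, h0, PySem.List.slice_natCast]
      congr 1
      omega
    simp only [List.any_map, Function.comp_def, hs, sub_zero]
    simp [pvRuns, List.contains_eq_mem]

-- ===== VERDICT (by name: the statement is the Claim_ definition above) =====
theorem check_run_spec : Claim_equal_check_run := by
  intro d _
  unfold Spec_check_run check_run_alt
  rw [check_run_eq_pvA, pvA_eq_pvT, pv_go_filter, pvL_start]
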